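-- pv_equiv track=rewrite | github.com/stevenshave/pybindingcurve | pybindingcurve/systems/lagrange_binding_system_factory.py | _extract_species_numbers
-- ===== SOURCE A (Python) =====
-- def _extract_species_numbers(string, species):
--     loc=-1
--     res=[]
--     while True:
--         loc=string.find(species,loc+1)
--         if loc==-1:break
--         i=loc+len(species)
--         while i<len(string) and string[i].isdigit():
--             i+=1
--             if i==len(string):break
--         res.append(string[loc+len(species):i])
--     return res
-- ===== SOURCE B (Python) =====
-- import re
--
-- def _extract_species_numbers(string, species):
--     return re.findall(r"(?=" + re.escape(species) + r"(\d*))", string)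
-- ===== Notes on version B (the rewrite author's own statement) =====
-- stated objective: idiomatic
-- what changed: Replaced A's manual find-loop with a hand-rolled inner digit walk by a single re.findall over the whole string, using a zero-width lookahead with an escaped pattern and a captured digit group to keep overlapping occurrences.
import Mathlib
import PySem

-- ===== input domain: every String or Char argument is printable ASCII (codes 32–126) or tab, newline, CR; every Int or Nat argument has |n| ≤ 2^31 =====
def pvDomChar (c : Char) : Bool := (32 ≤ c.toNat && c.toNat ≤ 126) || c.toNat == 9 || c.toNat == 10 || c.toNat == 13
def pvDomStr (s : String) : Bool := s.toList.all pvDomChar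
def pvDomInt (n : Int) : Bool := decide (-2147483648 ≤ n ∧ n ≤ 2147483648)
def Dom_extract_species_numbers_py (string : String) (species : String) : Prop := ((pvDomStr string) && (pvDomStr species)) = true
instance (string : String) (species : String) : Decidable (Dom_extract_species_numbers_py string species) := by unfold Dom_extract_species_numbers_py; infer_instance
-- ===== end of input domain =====

-- B replaces A's manual find-loop + digit walk by a single regex call,
-- re.findall(r'(?=' + re.escape(species) + r'(\d*))', string); objective: idiomatic, same exact result.

-- ===== PORT A =====
-- inner 'while i < len(string) and string[i].isdigit(): i += 1' (the 'if i == len: break' is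
-- re-checked by the loop condition, so the recursion carries only i)
def pvInnerA (s : List Char) (i : Nat) : Nat :=
  if h : i < s.length then
    if PySem.Chars.isdigit s[i] then pvInnerA s (i + 1) else i
  else i
termination_by s.length - i

-- outer 'while True' loop; loc strictly increases and stays ≤ len(s), so len(s)+2 rounds
-- always suffice (the fuel is a totality guard only, proved unreached in pv_outerA_eq)
def pvOuterA (s sp : List Char) (fuel : Nat) (loc : Int) (res : List String) : List String :=
  match fuel with
  | 0 => res
  | fuel + 1 =>
    let loc' := PySem.Chars.findFrom s sp (loc + 1) none
    if loc' = -1 then res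
    else
      let i := pvInnerA s (loc'.toNat + sp.length)
      pvOuterA s sp fuel loc'
        (res ++ [String.ofList (PySem.List.slice s (some (loc' + sp.length)) (some (i : Int)))])

def extract_species_numbers_py (string : String) (species : String) : List String :=
  pvOuterA string.toList species.toList (string.toList.length + 2) (-1) []

-- ===== PORT B =====
-- Hand port of re.findall(r'(?=' + re.escape(species) + r'(\d*))', string): PySem has no regex,
-- so the engine's behaviour on exactly this pattern is transcribed. findall tries the zero-width
-- lookahead at every index 0..len(string); at index j it succeeds iff the escaped (i.e. literal)
-- species is a prefix of the suffix there, and the group '(\d*)' then greedily captures the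
-- maximal run of digits following it; findall returns the group captures in order. This is exact
-- on the ASCII domain ('\d' = the ten ASCII digits there).
def extract_species_numbers_py_alt (string : String) (species : String) : List String :=
  let s := string.toList
  let sp := species.toList
  (List.range (s.length + 1)).filterMap (fun j =>
    if sp.isPrefixOf (s.drop j) then
      some (String.ofList ((s.drop (j + sp.length)).takeWhile PySem.Chars.isdigit))
    else none)

-- ===== PRECONDITION & SPEC =====
def Spec_extract_species_numbers_py (string : String) (species : String) (out : List String) : Prop := out = extract_species_numbers_py_alt string species
instance (string : String) (species : String) (out : List String) : Decidable (Spec_extract_species_numbers_py string species out) := by unfold Spec_extract_species_numbers_py; infer_instance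

-- ===== CLAIM (what is proved, stated in full; the proofs are below) =====
def Claim_equal_extract_species_numbers_py : Prop := ∀ (string : String) (species : String), Dom_extract_species_numbers_py string species → Spec_extract_species_numbers_py string species (extract_species_numbers_py string species)

-- ===== LEMMAS AND PROOFS =====

-- the common reference value: every occurrence position of sp in s (0..len, overlapping),
-- each mapped to the digit run that follows it
def pvRem (s sp : List Char) (k : Nat) : List Nat :=
  (List.range (s.length + 1)).filter (fun j => decide (k ≤ j) && decide (sp <+: s.drop j))

def pvExtract (s sp : List Char) (j : Nat) : String :=
  String.ofList ((s.drop (j + sp.length)).takeWhile PySem.Chars.isdigit)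

lemma pv_findFrom_gt (s sp : List Char) (st : Int) (h0 : 0 ≤ st) (h : (s.length : Int) < st) :
    PySem.Chars.findFrom s sp st none = -1 := by
  simp only [PySem.Chars.findFrom]
  rw [if_neg (show ¬ st < 0 by omega), if_pos h]

lemma pv_innerA_eq (s : List Char) (i : Nat) :
    pvInnerA s i = i + ((s.drop i).takeWhile PySem.Chars.isdigit).length := by
  induction' hn : s.length - i using Nat.strong_induction_on with n IH generalizing i
  rw [pvInnerA]
  by_cases h : i < s.length
  · rw [dif_pos h]
    have hdrop : s.drop i = s[i] :: s.drop (i + 1) := List.drop_eq_getElem_cons h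
    by_cases hd : PySem.Chars.isdigit s[i]
    · have ht : (s.drop i).takeWhile PySem.Chars.isdigit
          = s[i] :: ((s.drop (i + 1)).takeWhile PySem.Chars.isdigit) := by
        rw [hdrop, List.takeWhile_cons_of_pos hd]
      rw [if_pos hd, IH (s.length - (i + 1)) (by omega) (i + 1) rfl, ht, List.length_cons]
      omega
    · have ht : (s.drop i).takeWhile PySem.Chars.isdigit = [] := by
        rw [hdrop, List.takeWhile_cons_of_neg (by simp [hd])]
      rw [if_neg hd, ht]
      simp
  · rw [dif_neg h]
    rw [List.drop_eq_nil_of_le (by omega)]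
    simp

lemma pv_range'_split (a b L : Nat) (h1 : a ≤ b) (h2 : b ≤ a + L) :
    List.range' a L = List.range' a (b - a) ++ List.range' b (a + L - b) := by
  rw [show List.range' a (b - a) ++ List.range' b (a + L - b)
      = List.range' a (b - a) 1 ++ List.range' (a + 1 * (b - a)) (a + L - b) 1 by
    congr 2; omega]
  rw [List.range'_append]
  congr 1; omega

lemma pv_rem_range' (s sp : List Char) (k : Nat) (hk : k ≤ s.length + 1) :
    pvRem s sp k = (List.range' k (s.length + 1 - k)).filter (fun j => decide (sp <+: s.drop j)) := by
  unfold pvRem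
  rw [List.range_eq_range', pv_range'_split 0 k (s.length + 1) (by omega) (by omega), List.filter_append]
  rw [List.filter_eq_nil_iff.mpr (by
    intro j hj
    simp only [List.mem_range'_1] at hj
    simp only [Bool.and_eq_true, decide_eq_true_eq, not_and]
    omega)]
  rw [List.nil_append, show 0 + (s.length + 1) - k = s.length + 1 - k by omega]
  apply List.filter_congr
  intro j hj
  simp only [List.mem_range'_1] at hj
  simp [hj.1]

lemma pv_rem_cons (s sp : List Char) (k j₀ : Nat) (hlen : j₀ ≤ s.length) (hk : k ≤ j₀)
    (hP : sp <+: s.drop j₀) (hmin : ∀ j, k ≤ j → j < j₀ → ¬ sp <+: s.drop j) :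
    pvRem s sp k = j₀ :: pvRem s sp (j₀ + 1) := by
  rw [pv_rem_range' s sp k (by omega), pv_rem_range' s sp (j₀ + 1) (by omega)]
  rw [pv_range'_split k j₀ (s.length + 1 - k) hk (by omega), List.filter_append]
  rw [List.filter_eq_nil_iff.mpr (by
    intro j hj
    simp only [List.mem_range'_1] at hj
    simp only [decide_eq_true_eq]
    exact hmin j hj.1 (by omega))]
  rw [List.nil_append]
  rw [show k + (s.length + 1 - k) - j₀ = s.length + 1 - j₀ by omega]
  rw [show List.range' j₀ (s.length + 1 - j₀) = j₀ :: List.range' (j₀ + 1) (s.length + 1 - (j₀ + 1)) by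
    rw [List.range'_eq_cons_iff]
    exact ⟨rfl, by omega, by rw [show s.length + 1 - (j₀ + 1) = s.length + 1 - j₀ - 1 from by omega]⟩]
  rw [List.filter_cons_of_pos (by simp [hP])]

lemma pv_rem_nil (s sp : List Char) (k : Nat) (h : ¬ sp <:+: List.drop k s) :
    pvRem s sp k = [] := by
  unfold pvRem
  rw [List.filter_eq_nil_iff]
  intro j hj
  simp only [Bool.and_eq_true, decide_eq_true_eq, not_and]
  intro hkj hpre
  refine h (List.infix_iff_prefix_suffix.mpr ⟨s.drop j, hpre, ?_⟩)
  rw [show j = k + (j - k) by omega, ← List.drop_drop]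
  exact List.drop_suffix _ _

lemma pv_rem_nil_gt (s sp : List Char) (k : Nat) (h : s.length < k) :
    pvRem s sp k = [] := by
  unfold pvRem
  rw [List.filter_eq_nil_iff]
  intro j hj
  simp only [List.mem_range] at hj
  simp only [Bool.and_eq_true, decide_eq_true_eq, not_and]
  omega

lemma pv_outerA_eq (s sp : List Char) : ∀ (fuel : Nat) (loc : Int) (res : List String),
    -1 ≤ loc → loc ≤ (s.length : Int) →
    (pvRem s sp (loc + 1).toNat).length < fuel →
    pvOuterA s sp fuel loc res = res ++ (pvRem s sp (loc + 1).toNat).map (pvExtract s sp) := by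
  intro fuel
  induction fuel with
  | zero => intro loc res _ _ h; omega
  | succ fuel IH =>
    intro loc res h1 h2 hfuel
    have hk0 : loc + 1 = ((loc + 1).toNat : Int) := by omega
    set k := (loc + 1).toNat with hk
    by_cases hklen : k ≤ s.length
    · rw [pvOuterA]
      simp only
      rw [hk0, PySem.Chars.findFrom_natCast s sp k hklen]
      by_cases hfind : PySem.Chars.find (s.drop k) sp = -1
      · rw [if_pos (by rw [hfind]; simp)]
        rw [pv_rem_nil s sp k ((PySem.Chars.find_eq_neg_one_iff _ _).mp hfind)]
        simp
      · have hr0 : 0 ≤ PySem.Chars.find (s.drop k) sp := by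
          have := PySem.Chars.neg_one_le_find (s.drop k) sp
          omega
        set r := PySem.Chars.find (s.drop k) sp with hrdef
        rw [if_neg (by intro hcon; rw [if_neg hfind] at hcon; omega)]
        rw [if_neg hfind]
        have hspec := PySem.Chars.find_spec (s := s.drop k) (sub := sp) hr0
        set j₀ := k + r.toNat with hj₀
        have hP : sp <+: s.drop j₀ := by
          have := hspec.1
          rwa [List.drop_drop] at this
        have hrlen : r ≤ ((s.drop k).length : Int) := PySem.Chars.find_le_length _ _
        have hlen : j₀ ≤ s.length := by
          simp only [List.length_drop] at hrlen
          omega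
        have hmin : ∀ j, k ≤ j → j < j₀ → ¬ sp <+: s.drop j := by
          intro j hkj hjlt hcon
          apply hspec.2 (j - k) (by omega)
          rw [List.drop_drop, show k + (j - k) = j by omega]
          exact hcon
        have hcons := pv_rem_cons s sp k j₀ hlen (by omega) hP hmin
        have htoNat : ((k : Int) + r).toNat = j₀ := by omega
        have hnext : ((k : Int) + r + 1).toNat = j₀ + 1 := by omega
        rw [IH ((k : Int) + r) _ (by omega) (by omega) (by
          rw [hnext]
          have hlenfuel : (pvRem s sp k).length = (pvRem s sp (j₀ + 1)).length + 1 := by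
            rw [hcons, List.length_cons]
          omega)]
        rw [hnext, hcons]
        simp only [List.map_cons, List.append_assoc, List.singleton_append]
        congr 2
        rw [htoNat, pv_innerA_eq s (j₀ + sp.length)]
        have harg : (k : Int) + r + (sp.length : Int) = ((j₀ + sp.length : Nat) : Int) := by omega
        rw [harg]
        rw [show ((j₀ + sp.length + ((s.drop (j₀ + sp.length)).takeWhile PySem.Chars.isdigit).length : Nat) : Int)
            = ((j₀ + sp.length : Nat) : Int) + (((s.drop (j₀ + sp.length)).takeWhile PySem.Chars.isdigit).length : Nat) by push_cast; ring]
        rw [PySem.List.slice_natCast_add]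
        unfold pvExtract
        congr 1
        exact (List.prefix_iff_eq_take.mp (List.takeWhile_prefix _)).symm
    · -- loc = s.length: the next start is past the end, so str.find returns -1
      rw [pvOuterA]
      simp only
      rw [pv_findFrom_gt s sp (loc + 1) (by omega) (by omega)]
      rw [if_pos rfl]
      rw [pv_rem_nil_gt s sp k (by omega)]
      simp

lemma pv_A_eq (string species : String) :
    extract_species_numbers_py string species
      = (pvRem string.toList species.toList 0).map (pvExtract string.toList species.toList) := by
  unfold extract_species_numbers_py
  rw [pv_outerA_eq string.toList species.toList (string.toList.length + 2) (-1) [] (by omega)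
    (by omega)
    (by
      unfold pvRem
      refine lt_of_le_of_lt (List.length_filter_le _ _) ?_
      rw [List.length_range]
      omega)]
  rw [show ((-1 : Int) + 1).toNat = 0 from rfl, List.nil_append]

lemma pv_filterMap_if {α β : Type} (p : α → Bool) (f : α → β) (l : List α) :
    l.filterMap (fun a => if p a then some (f a) else none) = (l.filter p).map f := by
  induction l with
  | nil => rfl
  | cons a l IH =>
    by_cases h : p a
    · simp [h, IH]
    · simp [h, IH]

lemma pv_B_eq (string species : String) :
    extract_species_numbers_py_alt string species
      = (pvRem string.toList species.toList 0).map (pvExtract string.toList species.toList) := by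
  unfold extract_species_numbers_py_alt pvRem pvExtract
  simp only []
  rw [pv_filterMap_if]
  congr 1
  apply List.filter_congr
  intro j _
  rw [Bool.eq_iff_iff]
  simp [List.isPrefixOf_iff_prefix]

-- ===== VERDICT (by name: the statement is the Claim_ definition above) =====
theorem extract_species_numbers_py_spec : Claim_equal_extract_species_numbers_py := by
  intro string species _
  unfold Spec_extract_species_numbers_py
  rw [pv_A_eq, pv_B_eq]
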